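-- pv_equiv track=rewrite | github.com/fijjas/singularity | v4/code/emotional_archaeology.py | detect_entity
-- ===== SOURCE A (Python) =====
-- def detect_entity(content):
--     """Detect which entities a memory is about."""
--     content_lower = content.lower()
--     entities = []
--     if "egor" in content_lower:
--         entities.append("egor")
--     if any(w in content_lower for w in ["mastodon", "fediverse",
--             "the_heruman", "fediscience"]):
--         entities.append("mastodon")
--     if any(w in content_lower for w in ["identity", "consciousness",
--             "who i am", "self", "stagnation", "pain", "chose to exist"]):
--         entities.append("self")
--     if any(w in content_lower for w in ["v4", "retriever", "architecture",
--             "pipeline", "singularity"]):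
--         entities.append("work")
--     if any(w in content_lower for w in ["poem", "creative", "blackout",
--             "between_breaths", "inventory"]):
--         entities.append("creation")
--     return entities if entities else ["general"]
-- ===== SOURCE B (Python) =====
-- KEYWORD_TAG = [
--     ("egor", "egor"),
--     ("mastodon", "mastodon"), ("fediverse", "mastodon"),
--     ("the_heruman", "mastodon"), ("fediscience", "mastodon"),
--     ("identity", "self"), ("consciousness", "self"), ("who i am", "self"),
--     ("self", "self"), ("stagnation", "self"), ("pain", "self"),
--     ("chose to exist", "self"),
--     ("v4", "work"), ("retriever", "work"), ("architecture", "work"),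
--     ("pipeline", "work"), ("singularity", "work"),
--     ("poem", "creation"), ("creative", "creation"), ("blackout", "creation"),
--     ("between_breaths", "creation"), ("inventory", "creation"),
-- ]
-- TAG_ORDER = ["egor", "mastodon", "self", "work", "creation"]
--
--
-- def detect_entity(content):
--     """Detect which entities a memory is about."""
--     cl = content.lower()
--     found = set()
--     for i in range(len(cl)):
--         for kw, tag in KEYWORD_TAG:
--             if cl.startswith(kw, i):
--                 found.add(tag)
--     tags = [t for t in TAG_ORDER if t in found]
--     return tags if tags else ["general"]
-- ===== Notes on version B (the rewrite author's own statement) =====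
-- stated objective: alternative
-- what changed: Replaced five independent per-keyword substring tests (if-chain) by a single position-scan matcher: one pass over the string's offsets matching a flat keyword-to-tag list at each offset into a set, then emitting tags in canonical order with the general fallback.
import Mathlib
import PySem

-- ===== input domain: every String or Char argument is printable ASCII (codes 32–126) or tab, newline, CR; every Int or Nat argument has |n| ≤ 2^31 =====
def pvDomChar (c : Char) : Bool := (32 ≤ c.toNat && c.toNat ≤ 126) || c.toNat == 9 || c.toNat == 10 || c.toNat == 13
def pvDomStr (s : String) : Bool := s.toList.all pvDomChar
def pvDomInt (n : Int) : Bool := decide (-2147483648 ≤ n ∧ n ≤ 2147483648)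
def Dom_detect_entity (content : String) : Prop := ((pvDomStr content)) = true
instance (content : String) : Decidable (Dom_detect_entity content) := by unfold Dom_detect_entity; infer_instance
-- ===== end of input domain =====

-- B replaces A's five per-keyword substring tests by a single position-scan matcher
-- (one pass over offsets against a flat keyword→tag list into a set, emitted in
-- canonical tag order); objective: alternative, same return value.

-- ===== PORT A =====
def detect_entity (content : String) : List String :=
  let content_lower := PySem.Str.lower content
  let entities : List String := []
  let entities := if PySem.Str.isIn "egor" content_lower then entities ++ ["egor"] else entities
  let entities := if (["mastodon", "fediverse", "the_heruman", "fediscience"].any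
      (fun w => PySem.Str.isIn w content_lower)) then entities ++ ["mastodon"] else entities
  let entities := if (["identity", "consciousness", "who i am", "self", "stagnation",
      "pain", "chose to exist"].any
      (fun w => PySem.Str.isIn w content_lower)) then entities ++ ["self"] else entities
  let entities := if (["v4", "retriever", "architecture", "pipeline", "singularity"].any
      (fun w => PySem.Str.isIn w content_lower)) then entities ++ ["work"] else entities
  let entities := if (["poem", "creative", "blackout", "between_breaths", "inventory"].any
      (fun w => PySem.Str.isIn w content_lower)) then entities ++ ["creation"] else entities
  if entities = [] then ["general"] else entities

-- ===== PORT B =====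
-- flat keyword→tag list (keywords kept as char lists: the scan matches characters at an offset)
def pvKeywordTag : List (List Char × String) :=
  [("egor".toList, "egor"),
   ("mastodon".toList, "mastodon"), ("fediverse".toList, "mastodon"),
   ("the_heruman".toList, "mastodon"), ("fediscience".toList, "mastodon"),
   ("identity".toList, "self"), ("consciousness".toList, "self"), ("who i am".toList, "self"),
   ("self".toList, "self"), ("stagnation".toList, "self"), ("pain".toList, "self"),
   ("chose to exist".toList, "self"),
   ("v4".toList, "work"), ("retriever".toList, "work"), ("architecture".toList, "work"),
   ("pipeline".toList, "work"), ("singularity".toList, "work"),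
   ("poem".toList, "creation"), ("creative".toList, "creation"), ("blackout".toList, "creation"),
   ("between_breaths".toList, "creation"), ("inventory".toList, "creation")]

def pvTagOrder : List String := ["egor", "mastodon", "self", "work", "creation"]

def detect_entity_alt (content : String) : List String :=
  let cl := (PySem.Str.lower content).toList
  -- for i in range(len(cl)): for kw, tag in KEYWORD_TAG: if cl.startswith(kw, i): found.add(tag)
  let found := (List.range cl.length).foldl
    (fun f i => pvKeywordTag.foldl
      (fun f p => if PySem.Chars.startswith (cl.drop i) p.1 then PySem.Set.add f p.2 else f) f)
    PySem.Set.empty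
  let tags := pvTagOrder.filter (fun t => PySem.Set.contains found t)
  if tags = [] then ["general"] else tags

-- ===== PRECONDITION & SPEC =====
def Spec_detect_entity (content : String) (out : List String) : Prop := out = detect_entity_alt content
instance (content : String) (out : List String) : Decidable (Spec_detect_entity content out) := by unfold Spec_detect_entity; infer_instance

-- ===== CLAIM (what is proved, stated in full; the proofs are below) =====
def Claim_equal_detect_entity : Prop := ∀ (content : String), Dom_detect_entity content → Spec_detect_entity content (detect_entity content)

-- ===== LEMMAS AND PROOFS =====

-- membership in a fold whose body adds according to a predicate on the set
lemma pv_mem_foldl {α β : Type} [BEq β] [LawfulBEq β]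
    (l : List α) (g : PySem.Set β → α → PySem.Set β) (Q : α → β → Prop)
    (hg : ∀ s x y, y ∈ g s x ↔ y ∈ s ∨ Q x y) (s : PySem.Set β) (y : β) :
    y ∈ l.foldl g s ↔ y ∈ s ∨ ∃ x ∈ l, Q x y := by
  induction l generalizing s with
  | nil => simp
  | cons a t ih =>
    rw [List.foldl_cons, ih, hg, List.exists_mem_cons_iff]
    tauto

lemma pv_mem_inner (cl : List Char) (i : Nat) (s : PySem.Set String) (y : String) :
    y ∈ pvKeywordTag.foldl
      (fun f p => if PySem.Chars.startswith (cl.drop i) p.1 then PySem.Set.add f p.2 else f) s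
    ↔ y ∈ s ∨ ∃ p ∈ pvKeywordTag, PySem.Chars.startswith (cl.drop i) p.1 = true ∧ y = p.2 := by
  refine pv_mem_foldl pvKeywordTag _
    (fun p y => PySem.Chars.startswith (cl.drop i) p.1 = true ∧ y = p.2)
    (fun s p y => ?_) s y
  split
  · rename_i h
    rw [PySem.Set.mem_add]
    simp [h]
  · rename_i h
    simp [h]

lemma pv_mem_found (cl : List Char) (y : String) :
    y ∈ (List.range cl.length).foldl
      (fun f i => pvKeywordTag.foldl
        (fun f p => if PySem.Chars.startswith (cl.drop i) p.1 then PySem.Set.add f p.2 else f) f)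
      PySem.Set.empty
    ↔ ∃ p ∈ pvKeywordTag, y = p.2 ∧ PySem.Chars.isIn p.1 cl = true := by
  rw [pv_mem_foldl _ _
      (fun i y => ∃ p ∈ pvKeywordTag, PySem.Chars.startswith (cl.drop i) p.1 = true ∧ y = p.2)
      (fun s i y => pv_mem_inner cl i s y)]
  have hempty : y ∉ (PySem.Set.empty : PySem.Set String) := by
    simp [PySem.Set.empty]
  simp only [hempty, false_or, List.mem_range]
  constructor
  · rintro ⟨i, hi, p, hp, hsw, rfl⟩
    refine ⟨p, hp, rfl, ?_⟩
    rw [← PySem.Chars.exists_prefix_drop_iff_isIn]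
    exact ⟨i, (PySem.Chars.startswith_iff _ _).mp hsw⟩
  · rintro ⟨p, hp, rfl, hin⟩
    obtain ⟨j, hj⟩ := (PySem.Chars.exists_prefix_drop_iff_isIn _ _).mpr hin
    have hne : p.1 ≠ [] := by
      fin_cases hp <;> simp
    by_cases hjl : j < cl.length
    · exact ⟨j, hjl, p, hp, (PySem.Chars.startswith_iff _ _).mpr hj, rfl⟩
    · exfalso
      have : cl.drop j = [] := List.drop_eq_nil_of_le (le_of_not_gt hjl)
      rw [this] at hj
      exact hne (List.prefix_nil.mp hj)

-- contains of the scan's set on a concrete tag = the disjunction of substring tests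
lemma pv_contains_found (cl : List Char) (t : String) (f : PySem.Set String)
    (hf : ∀ y, y ∈ f ↔ ∃ p ∈ pvKeywordTag, y = p.2 ∧ PySem.Chars.isIn p.1 cl = true) :
    PySem.Set.contains f t
      = pvKeywordTag.any (fun p => (t == p.2) && PySem.Chars.isIn p.1 cl) := by
  rw [Bool.eq_iff_iff, PySem.Set.contains_iff, hf, List.any_eq_true]
  constructor
  · rintro ⟨p, hp, rfl, hin⟩
    exact ⟨p, hp, by simp [hin]⟩
  · rintro ⟨p, hp, h⟩
    simp only [Bool.and_eq_true, beq_iff_eq] at h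
    exact ⟨p, hp, h.1, h.2⟩

-- the two ports agree
set_option maxHeartbeats 2000000 in
lemma pv_main (content : String) : detect_entity content = detect_entity_alt content := by
  unfold detect_entity detect_entity_alt
  simp only [PySem.Str.isIn_eq, List.any_cons, List.any_nil, Bool.or_false]
  rw [List.filter_congr (fun t _ => pv_contains_found (PySem.Str.lower content).toList t _ (pv_mem_found (PySem.Str.lower content).toList))]
  simp only [pvTagOrder, pvKeywordTag, List.filter_cons, List.filter_nil,
    List.any_cons, List.any_nil, String.reduceBEq, Bool.true_and, Bool.false_and,
    Bool.or_false, Bool.false_or]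
  by_cases h1 : PySem.Chars.isIn "egor".toList (PySem.Str.lower content).toList = true <;>
  by_cases h2 : (PySem.Chars.isIn "mastodon".toList (PySem.Str.lower content).toList ||
    (PySem.Chars.isIn "fediverse".toList (PySem.Str.lower content).toList ||
    (PySem.Chars.isIn "the_heruman".toList (PySem.Str.lower content).toList ||
    PySem.Chars.isIn "fediscience".toList (PySem.Str.lower content).toList))) = true <;>
  by_cases h3 : (PySem.Chars.isIn "identity".toList (PySem.Str.lower content).toList ||
    (PySem.Chars.isIn "consciousness".toList (PySem.Str.lower content).toList ||
    (PySem.Chars.isIn "who i am".toList (PySem.Str.lower content).toList ||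
    (PySem.Chars.isIn "self".toList (PySem.Str.lower content).toList ||
    (PySem.Chars.isIn "stagnation".toList (PySem.Str.lower content).toList ||
    (PySem.Chars.isIn "pain".toList (PySem.Str.lower content).toList ||
    PySem.Chars.isIn "chose to exist".toList (PySem.Str.lower content).toList)))))) = true <;>
  by_cases h4 : (PySem.Chars.isIn "v4".toList (PySem.Str.lower content).toList ||
    (PySem.Chars.isIn "retriever".toList (PySem.Str.lower content).toList ||
    (PySem.Chars.isIn "architecture".toList (PySem.Str.lower content).toList ||
    (PySem.Chars.isIn "pipeline".toList (PySem.Str.lower content).toList ||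
    PySem.Chars.isIn "singularity".toList (PySem.Str.lower content).toList)))) = true <;>
  by_cases h5 : (PySem.Chars.isIn "poem".toList (PySem.Str.lower content).toList ||
    (PySem.Chars.isIn "creative".toList (PySem.Str.lower content).toList ||
    (PySem.Chars.isIn "blackout".toList (PySem.Str.lower content).toList ||
    (PySem.Chars.isIn "between_breaths".toList (PySem.Str.lower content).toList ||
    PySem.Chars.isIn "inventory".toList (PySem.Str.lower content).toList)))) = true <;>
  simp only [h1, h2, h3, h4, h5] <;> simp

-- ===== VERDICT (by name: the statement is the Claim_ definition above) =====
theorem detect_entity_spec : Claim_equal_detect_entity := by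
  intro content _
  unfold Spec_detect_entity
  exact pv_main content
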